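-- pv_equiv track=rewrite | github.com/NishkaDG/cca2-mceliece | auxiliary.py | vector_to_positional
-- ===== SOURCE A (Python) =====
-- def vector_to_positional(vec):
--     delta_lst = []
--     ctr = 0
--     for ele in vec[0]:
--         if int(ele) == 1:
--             delta_lst.append(ctr)
--             ctr = 0
--         else:
--             ctr = ctr + 1
--     return delta_lst
-- ===== SOURCE B (Python) =====
-- def vector_to_positional(vec):
--     positions = [i for i, ele in enumerate(vec[0]) if int(ele) == 1]
--     if not positions:
--         return []
--     return [positions[0]] + [b - a - 1 for a, b in zip(positions, positions[1:])]
-- ===== Notes on version B (the rewrite author's own statement) =====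
-- stated objective: alternative
-- what changed: Replaces the running zero-counter single pass with an index-collection pass (positions of 1-bits) followed by a consecutive-difference pass over that position list.
import Mathlib
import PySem

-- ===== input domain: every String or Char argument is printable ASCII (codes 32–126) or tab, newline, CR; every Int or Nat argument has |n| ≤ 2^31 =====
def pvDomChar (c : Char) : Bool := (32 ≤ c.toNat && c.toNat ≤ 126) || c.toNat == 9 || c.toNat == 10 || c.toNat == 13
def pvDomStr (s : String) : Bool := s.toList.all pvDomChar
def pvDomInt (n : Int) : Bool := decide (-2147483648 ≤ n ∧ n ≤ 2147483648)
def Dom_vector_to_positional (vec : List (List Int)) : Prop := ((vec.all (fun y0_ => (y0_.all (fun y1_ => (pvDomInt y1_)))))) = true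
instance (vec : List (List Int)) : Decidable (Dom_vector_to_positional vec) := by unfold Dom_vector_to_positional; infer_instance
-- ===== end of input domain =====

-- B replaces A's running zero-counter pass by a 1-bit position list plus consecutive differences (alternative decomposition, same cost).


-- ===== PORT A =====
def vector_to_positional (vec : List (List Int)) : List Int :=
  -- vec[0]; Pre_ excludes vec = [] where Python raises IndexError, so getD [] is never reached there
  let row := (PySem.List.pyGet? vec 0).getD []
  (row.foldl (fun (st : List Int × Int) ele =>
      if ele == 1 then (st.1 ++ [st.2], 0) else (st.1, st.2 + 1)) ([], 0)).1

-- ===== PORT B =====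
def vector_to_positional_alt (vec : List (List Int)) : List Int :=
  let row := (PySem.List.pyGet? vec 0).getD []
  let positions := (PySem.List.enumerate row).filterMap
    (fun p => if p.2 == 1 then some p.1 else none)
  match positions with
  | [] => []
  | p :: rest => p :: (List.zip (p :: rest) rest).map (fun q => q.2 - q.1 - 1)

-- ===== PRECONDITION & SPEC =====
-- Pre_ excludes only vec = [], on which Python A raises IndexError at vec[0]
def Pre_vector_to_positional (vec : List (List Int)) : Prop := vec ≠ []
instance (vec : List (List Int)) : Decidable (Pre_vector_to_positional vec) := by unfold Pre_vector_to_positional; infer_instance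
def pvWitness_vector_to_positional : List (List Int) := [[0, 1, 0, 0, 1]]
def Spec_vector_to_positional (vec : List (List Int)) (out : List Int) : Prop := out = vector_to_positional_alt vec
instance (vec : List (List Int)) (out : List Int) : Decidable (Spec_vector_to_positional vec out) := by unfold Spec_vector_to_positional; infer_instance

-- ===== CLAIM =====
def Claim_equal_vector_to_positional : Prop := ∀ (vec : List (List Int)), Dom_vector_to_positional vec → Pre_vector_to_positional vec → Spec_vector_to_positional vec (vector_to_positional vec)

-- ===== LEMMAS AND PROOFS =====

-- the gap list A's loop produces from counter c onwards
def gapsOf : List Int → Int → List Int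
  | [], _ => []
  | e :: t, c => if e == 1 then c :: gapsOf t 0 else gapsOf t (c + 1)

lemma foldl_eq_gapsOf (row : List Int) (acc : List Int) (c : Int) :
    (row.foldl (fun (st : List Int × Int) ele =>
      if ele == 1 then (st.1 ++ [st.2], 0) else (st.1, st.2 + 1)) (acc, c)).1
    = acc ++ gapsOf row c := by
  induction row generalizing acc c with
  | nil => simp [gapsOf]
  | cons e t ih =>
    by_cases h : (e == 1) = true <;>
      simp only [List.foldl_cons, h, if_true, if_false, gapsOf, ih] <;> simp

-- positions of 1-bits when enumeration starts at s
def posFrom (row : List Int) (s : Int) : List Int :=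
  (PySem.List.enumerate row s).filterMap (fun p => if p.2 == 1 then some p.1 else none)

lemma posFrom_nil (s : Int) : posFrom [] s = [] := by
  simp [posFrom, PySem.List.enumerate_nil]

lemma posFrom_cons (e : Int) (t : List Int) (s : Int) :
    posFrom (e :: t) s = if e == 1 then s :: posFrom t (s + 1) else posFrom t (s + 1) := by
  by_cases h : (e == 1) = true <;>
    simp only [posFrom, PySem.List.enumerate_cons, List.filterMap_cons, h, if_true, if_false] <;>
    simp [h]

lemma gapsOf_eq_posFrom (row : List Int) (c s : Int) :
    gapsOf row c = match posFrom row s with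
      | [] => []
      | p :: rest => (c + (p - s)) :: (List.zip (p :: rest) rest).map (fun q => q.2 - q.1 - 1) := by
  induction row generalizing c s with
  | nil => simp [gapsOf, posFrom_nil]
  | cons e t ih =>
    by_cases h : (e == 1) = true
    · simp only [gapsOf, posFrom_cons, h, if_true]
      rcases hq : posFrom t (s + 1) with _ | ⟨p, rest⟩
      · have hrec := ih 0 (s + 1); rw [hq] at hrec
        simp only [hrec]
        simp
      · have hrec := ih 0 (s + 1); rw [hq] at hrec
        simp only [hrec, List.zip_cons_cons, List.map_cons]
        rw [show (0:Int) + (p - (s + 1)) = p - s - 1 by ring,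
            show c + (s - s) = c by ring]
    · simp only [gapsOf, posFrom_cons, h, Bool.false_eq_true, if_false]
      rcases hq : posFrom t (s + 1) with _ | ⟨p, rest⟩
      · have hrec := ih (c + 1) (s + 1); rw [hq] at hrec
        simp only [hrec]
      · have hrec := ih (c + 1) (s + 1); rw [hq] at hrec
        simp only [hrec]
        rw [show c + 1 + (p - (s + 1)) = c + (p - s) by ring]

-- ===== VERDICT =====
theorem vector_to_positional_spec : Claim_equal_vector_to_positional := by
  intro vec _ _
  unfold Spec_vector_to_positional vector_to_positional vector_to_positional_alt
  set row := (PySem.List.pyGet? vec 0).getD [] with hrow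
  have h1 := foldl_eq_gapsOf row [] 0
  have h2 := gapsOf_eq_posFrom row 0 0
  simp only [List.nil_append] at h1
  rw [h1, h2]
  show _ = (match posFrom row 0 with
    | [] => ([] : List Int)
    | p :: rest => p :: (List.zip (p :: rest) rest).map (fun q : Int × Int => q.2 - q.1 - 1))
  rcases hp : posFrom row 0 with _ | ⟨p, rest⟩ <;> simp
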